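-- pv_equiv track=rewrite | github.com/physnya/vocab-shell | vocab_shell/cli.py | _attach_examples_to_definitions
-- ===== SOURCE A (Python) =====
-- def _attach_examples_to_definitions(
--     definitions: list[str], examples: list[str]
-- ) -> list[list[str]]:
--     groups = [[] for _ in definitions]
--     if not definitions or not examples:
--         return groups
--
--     seed_count = min(len(definitions), len(examples))
--     for idx in range(seed_count):
--         groups[idx].append(examples[idx])
--
--     for idx in range(seed_count, len(examples)):
--         groups[idx % len(definitions)].append(examples[idx])
--     return groups
-- ===== SOURCE B (Python) =====
-- def _attach_examples_to_definitions(
--     definitions: list[str], examples: list[str]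
-- ) -> list[list[str]]:
--     n = len(definitions)
--     return [examples[i::n] for i in range(n)]
-- ===== Notes on version B (the rewrite author's own statement) =====
-- stated objective: simpler
-- what changed: Replaced the seed loop plus modulo loop that append examples one-by-one into pre-built groups with a per-group strided slice: group i is extracted directly as examples[i::n].
import Mathlib
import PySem

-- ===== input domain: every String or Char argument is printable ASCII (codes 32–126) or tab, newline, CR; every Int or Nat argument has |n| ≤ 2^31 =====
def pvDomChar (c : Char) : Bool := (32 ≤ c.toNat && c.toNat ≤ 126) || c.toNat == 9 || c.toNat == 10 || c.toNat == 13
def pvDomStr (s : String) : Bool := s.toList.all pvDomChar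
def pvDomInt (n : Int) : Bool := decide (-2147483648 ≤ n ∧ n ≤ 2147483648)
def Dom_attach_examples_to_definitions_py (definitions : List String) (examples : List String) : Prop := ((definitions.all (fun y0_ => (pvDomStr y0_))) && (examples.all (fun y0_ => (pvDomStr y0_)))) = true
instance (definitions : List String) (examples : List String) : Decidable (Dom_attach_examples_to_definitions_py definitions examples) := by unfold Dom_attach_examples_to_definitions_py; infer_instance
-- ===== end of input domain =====

-- B replaces A's seed loop + modulo loop (one forward pass appending into pre-built groups)
-- with a per-group strided slice examples[i::n]; objective: simpler.

-- ===== PORT A =====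
-- the indices idx used below are nonnegative and in range, so .toNat / pyGetD with default "" are exact
def attach_examples_to_definitions_py (definitions : List String) (examples : List String) : List (List String) :=
  let groups : List (List String) := definitions.map (fun _ => ([] : List String))
  if definitions = [] ∨ examples = [] then groups
  else
    let seed_count : Int := min (PySem.List.len definitions) (PySem.List.len examples)
    let groups := (PySem.List.pyRange 0 seed_count).foldl
      (fun gs idx => gs.set idx.toNat ((gs.getD idx.toNat []) ++ [PySem.List.pyGetD examples idx ""])) groups
    (PySem.List.pyRange seed_count (PySem.List.len examples)).foldl
      (fun gs idx =>
        gs.set (PySem.Int.mod idx (PySem.List.len definitions)).toNat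
          ((gs.getD (PySem.Int.mod idx (PySem.List.len definitions)).toNat [])
            ++ [PySem.List.pyGetD examples idx ""])) groups

-- ===== PORT B =====
-- .getD [] is exact: a slice with nonnegative start, no stop and positive step n never raises
def attach_examples_to_definitions_py_alt (definitions : List String) (examples : List String) : List (List String) :=
  let n : Int := PySem.List.len definitions
  (PySem.List.pyRange 0 n).map (fun i => (PySem.List.slice? examples (some i) none n).getD [])

-- ===== PRECONDITION & SPEC =====
def Spec_attach_examples_to_definitions_py (definitions : List String) (examples : List String) (out : List (List String)) : Prop := out = attach_examples_to_definitions_py_alt definitions examples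
instance (definitions : List String) (examples : List String) (out : List (List String)) : Decidable (Spec_attach_examples_to_definitions_py definitions examples out) := by unfold Spec_attach_examples_to_definitions_py; infer_instance

-- ===== CLAIM (what is proved, stated in full; the proofs are below) =====
def Claim_equal_attach_examples_to_definitions_py : Prop := ∀ (definitions : List String) (examples : List String), Dom_attach_examples_to_definitions_py definitions examples → Spec_attach_examples_to_definitions_py definitions examples (attach_examples_to_definitions_py definitions examples)

-- ===== LEMMAS AND PROOFS =====

-- the round-robin groups of the first m elements of xs: group j collects xs[i] for i < m, i ≡ j (mod n)
def pvGroupUpTo (n j m : Nat) (xs : List String) : List String :=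
  ((List.range m).filter (fun i => i % n == j)).map (fun i => xs.getD i "")

-- setting slot j of a tabulated list to "old value ++ [x]"
theorem pv_set_map_range {n j : Nat} (hj : j < n) (g : Nat → List String) (x : String) :
    ((List.range n).map g).set j (((List.range n).map g).getD j [] ++ [x])
      = (List.range n).map (fun j' => if j' = j then g j ++ [x] else g j') := by
  have hlen : j < ((List.range n).map g).length := by simpa using hj
  have hgetD : ((List.range n).map g).getD j [] = g j := by
    rw [List.getD_eq_getElem _ _ hlen]; simp
  apply List.ext_getElem
  · simp
  · intro k hk hk'
    rw [List.getElem_set]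
    simp only [List.getElem_map, List.getElem_range] at *
    by_cases h : j = k
    · subst h; rw [hgetD]
    · simp [h, Ne.symm h]

theorem pv_groupUpTo_succ (n j m : Nat) (xs : List String) :
    pvGroupUpTo n j (m + 1) xs
      = if j = m % n then pvGroupUpTo n j m xs ++ [xs.getD m ""] else pvGroupUpTo n j m xs := by
  unfold pvGroupUpTo
  rw [List.range_succ, List.filter_append]
  by_cases h : m % n = j
  · simp [h]
  · have h' : ¬ j = m % n := fun hh => h hh.symm
    simp [h, h']

-- invariant of the merged A-loop
theorem pv_loopA (xs : List String) (n : Nat) (hn : 0 < n) :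
    ∀ (m : Nat), m ≤ xs.length →
    (PySem.List.pyRange 0 (m : Int)).foldl
      (fun gs idx =>
        gs.set (PySem.Int.mod idx (n : Int)).toNat
          ((gs.getD (PySem.Int.mod idx (n : Int)).toNat []) ++ [PySem.List.pyGetD xs idx ""]))
      ((List.range n).map (fun _ => ([] : List String)))
      = (List.range n).map (fun j => pvGroupUpTo n j m xs) := by
  intro m hm
  induction m with
  | zero =>
      simp [pvGroupUpTo]
  | succ m ih =>
      have hm' : m ≤ xs.length := Nat.le_of_succ_le hm
      have hcast : ((m + 1 : Nat) : Int) = (m : Int) + 1 := by push_cast; ring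
      rw [hcast, PySem.List.pyRange_one_succ_right (by omega), List.foldl_append, ih hm']
      have hmod : PySem.Int.mod (m : Int) (n : Int) = ((m % n : Nat) : Int) := by
        show Int.fmod _ _ = _
        rw [Int.fmod_eq_emod, if_pos (Or.inl (show (0:Int) ≤ (n : Int) by omega))]
        omega
      have hget : PySem.List.pyGetD xs (m : Int) "" = xs.getD m "" := by
        rw [PySem.List.pyGetD_of_nonneg xs "" (by omega)]; simp
      simp only [List.foldl_cons, List.foldl_nil, hmod, hget, Int.toNat_natCast]
      rw [pv_set_map_range (Nat.mod_lt m hn)]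
      apply List.map_congr_left
      intro j hj
      rw [pv_groupUpTo_succ]
      split_ifs with hjj
      · rw [hjj]
      · rfl

-- n*a + s with s < n divided by n is a  (helper for the stride count)
theorem pv_div_aux {n a s : Nat} (hn : 0 < n) (hs : s < n) : (n * a + s) / n = a := by
  rw [Nat.mul_add_div hn, Nat.div_eq_of_lt hs]
  omega

-- the indices < m congruent to j mod n are exactly j, j+n, j+2n, …
theorem pv_filter_range_mod (n j : Nat) (hn : 0 < n) (hj : j < n) :
    ∀ m : Nat, (List.range m).filter (fun i => i % n == j)
      = (List.range ((m - j + n - 1) / n)).map (fun k => j + n * k) := by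
  intro m
  induction m with
  | zero =>
      have : (n - 1) / n = 0 := Nat.div_eq_of_lt (by omega)
      simp [this]
  | succ m ih =>
      rw [List.range_succ, List.filter_append, ih]
      obtain ⟨q, r, hq, hrn⟩ : ∃ q r, m = n * q + r ∧ r < n :=
        ⟨m / n, m % n, ((Nat.div_add_mod m n).symm), Nat.mod_lt m hn⟩
      have hmr : m % n = r := by rw [hq, Nat.mul_add_mod, Nat.mod_eq_of_lt hrn]
      by_cases h : m % n = j
      · have hrj : r = j := by omega
        have hexp : n * (q + 1) = n * q + n := by ring
        have hc1 : m - j + n - 1 = n * q + (n - 1) := by omega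
        have hc2 : m + 1 - j + n - 1 = n * (q + 1) + 0 := by omega
        rw [hc1, hc2, pv_div_aux hn (by omega), pv_div_aux hn hn, List.range_succ, List.map_append]
        have hjq : j + n * q = m := by omega
        simp [h, hjq]
      · have hrj : r ≠ j := by omega
        have heq : (m + 1 - j + n - 1) / n = (m - j + n - 1) / n := by
          rcases Nat.lt_or_ge m j with hmj | hjm
          · have hsame : m + 1 - j + n - 1 = m - j + n - 1 := by omega
            rw [hsame]
          · rcases Nat.lt_or_ge j r with hlt | hge
            · have hexp : n * (q + 1) = n * q + n := by ring
              have hc1 : m - j + n - 1 = n * (q + 1) + (r - j - 1) := by omega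
              have hc2 : m + 1 - j + n - 1 = n * (q + 1) + (r - j) := by omega
              rw [hc1, hc2, pv_div_aux hn (by omega), pv_div_aux hn (by omega)]
            · have hjr : r < j := by omega
              have hc1 : m - j + n - 1 = n * q + (n - 1 - j + r) := by omega
              have hc2 : m + 1 - j + n - 1 = n * q + (n - j + r) := by omega
              rw [hc1, hc2, pv_div_aux hn (by omega), pv_div_aux hn (by omega)]
        rw [heq]
        simp [h]

theorem pv_filterMap_eq_map {α β : Type} (l : List α) (f : α → Option β) (g : α → β)
    (h : ∀ a ∈ l, f a = some (g a)) : l.filterMap f = l.map g := by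
  induction l with
  | nil => rfl
  | cons a l ih =>
      simp only [List.filterMap_cons, h a List.mem_cons_self, List.map_cons]
      rw [ih (fun b hb => h b (List.mem_cons_of_mem a hb))]

-- B's strided slice is exactly group j of the round-robin distribution
theorem pv_slice_eq_group (xs : List String) (n j : Nat) (hn : 0 < n) (hj : j < n) :
    (PySem.List.slice? xs (some (j : Int)) none (n : Int)).getD []
      = pvGroupUpTo n j xs.length xs := by
  have hnz : (n : Int) ≠ 0 := by omega
  unfold PySem.List.slice? PySem.List.sliceIndices
  have hstep : ¬ ((n : Int) < 0) := by omega
  have hjpos : ¬ ((j : Int) < 0) := by omega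
  simp only [if_neg hnz, hstep, if_false, hjpos, if_pos (show (0:Int) < (n:Int) by omega)]
  rcases Nat.lt_or_ge j xs.length with hlt | hge
  · -- j < len: the slice hits indices j, j+n, … all in range
    have hmin : min (j : Int) ((xs.length : Int)) = (j : Int) := by omega
    have hse : (j : Int) < (xs.length : Int) := by omega
    rw [hmin, if_pos hse]
    have hcount : (((xs.length : Int) - (j : Int) + (n : Int) - 1) / (n : Int)).toNat
        = (xs.length - j + n - 1) / n := by
      have h1 : ((xs.length : Int) - (j : Int) + (n : Int) - 1)
          = ((xs.length - j + n - 1 : Nat) : Int) := by omega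
      have h2 : (((xs.length - j + n - 1 : Nat) : Int) / ((n : Nat) : Int))
          = (((xs.length - j + n - 1) / n : Nat) : Int) := by push_cast; ring
      rw [h1, h2, Int.toNat_natCast]
    rw [hcount, Option.getD_some]
    unfold pvGroupUpTo
    rw [pv_filter_range_mod n j hn hj xs.length, List.map_map]
    apply pv_filterMap_eq_map
    intro k hk
    simp only [List.mem_range] at hk
    have hbound : j + n * k < xs.length := by
      have h1 : n * ((xs.length - j + n - 1) / n) ≤ xs.length - j + n - 1 :=
        Nat.mul_div_le _ _
      have h2 : n * (k + 1) ≤ n * ((xs.length - j + n - 1) / n) :=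
        Nat.mul_le_mul_left n hk
      have h3 : n * (k + 1) = n * k + n := by ring
      omega
    have hidx : ((j : Int) + (n : Int) * (k : Int)) = ((j + n * k : Nat) : Int) := by
      push_cast; ring
    rw [hidx, Int.toNat_natCast]
    simp [List.getElem?_eq_getElem hbound]
  · -- len ≤ j: the slice is empty and no index < len is ≡ j (mod n)
    have hmin : min (j : Int) ((xs.length : Int)) = (xs.length : Int) := by omega
    rw [hmin, if_neg (by omega)]
    simp only [List.range_zero, List.filterMap_nil, Option.getD_some]
    unfold pvGroupUpTo
    have hnil : (List.range xs.length).filter (fun i => i % n == j) = [] := by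
      rw [List.filter_eq_nil_iff]
      intro i hi
      simp only [List.mem_range] at hi
      simp only [beq_iff_eq]
      have : i % n ≤ i := Nat.mod_le i n
      omega
    rw [hnil]; rfl

-- ===== VERDICT (by name: the statement is the Claim_ definition above) =====
theorem attach_examples_to_definitions_py_spec : Claim_equal_attach_examples_to_definitions_py := by
  intro definitions examples _
  show attach_examples_to_definitions_py definitions examples
      = attach_examples_to_definitions_py_alt definitions examples
  by_cases hd : definitions = []
  · subst hd
    simp [attach_examples_to_definitions_py, attach_examples_to_definitions_py_alt]
  · have hn : 0 < definitions.length := List.length_pos_iff.mpr hd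
    simp only [attach_examples_to_definitions_py, attach_examples_to_definitions_py_alt,
      PySem.List.len_eq]
    set n := definitions.length with hndef
    have hB : (PySem.List.pyRange 0 (n : Int)).map
          (fun i => (PySem.List.slice? examples (some i) none (n : Int)).getD [])
        = (List.range n).map (fun j => pvGroupUpTo n j examples.length examples) := by
      rw [PySem.List.pyRange_one]
      have h0 : ((n : Int) - 0).toNat = n := by omega
      rw [h0, List.map_map]
      apply List.map_congr_left
      intro j hj
      simp only [List.mem_range] at hj
      simp only [Function.comp, zero_add]
      exact pv_slice_eq_group examples n j hn hj
    rw [hB]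
    by_cases he : examples = []
    · subst he
      simp [hd, pvGroupUpTo, List.map_const']
      omega
    · rw [if_neg (show ¬ (definitions = [] ∨ examples = []) by simp [hd, he])]
      have hmm : definitions.map (fun _ => ([] : List String))
          = (List.range n).map (fun _ => ([] : List String)) := by
        simp [List.map_const']
        omega
      have hseed : min ((n : Nat) : Int) ((examples.length : Nat) : Int)
          = ((min n examples.length : Nat) : Int) := by omega
      have hcong : ∀ (gs : List (List String)),
          ∀ idx ∈ PySem.List.pyRange 0 ((min n examples.length : Nat) : Int),
          gs.set idx.toNat ((gs.getD idx.toNat []) ++ [PySem.List.pyGetD examples idx ""])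
            = gs.set (PySem.Int.mod idx (n : Int)).toNat
                ((gs.getD (PySem.Int.mod idx (n : Int)).toNat [])
                  ++ [PySem.List.pyGetD examples idx ""]) := by
        intro gs idx hidx
        rw [PySem.List.mem_pyRange_one] at hidx
        have hlt : idx < (n : Int) := by omega
        have hmod : PySem.Int.mod idx (n : Int) = idx := by
          show Int.fmod _ _ = _
          rw [Int.fmod_eq_emod, if_pos (Or.inl (show (0:Int) ≤ (n : Int) by omega))]
          rw [Int.emod_eq_of_lt hidx.1 hlt]
          omega
        rw [hmod]
      rw [hseed, PySem.List.foldl_congr_mem _ _ _ _ hcong, hmm,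
        ← List.foldl_append,
        ← PySem.List.pyRange_one_append 0 ((min n examples.length : Nat) : Int)
          ((examples.length : Nat) : Int) (by omega) (by omega)]
      exact pv_loopA examples n hn examples.length le_rfl
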